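-- pv_equiv track=rewrite | github.com/algoritmos-e-estrutura-de-dados/exame-RenanCostaNunes | labs/atividade-05/main.py | maximizar_troca_de_figurinhas
-- ===== SOURCE A (Python) =====
-- def maximizar_troca_de_figurinhas(figurinhas_da_maria, figurinhas_do_joao):
--     cont = 0
--     qtd = 0
--
--     if len(figurinhas_da_maria) < len(figurinhas_do_joao):
--         for i in range(len(figurinhas_da_maria)):
--             for j in range(len(figurinhas_do_joao)):
--                 if figurinhas_da_maria[i] == figurinhas_do_joao[j]:
--                     cont += 1
--         qtd = len(figurinhas_da_maria) - cont
--
--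
--     elif len(figurinhas_do_joao) < len(figurinhas_da_maria):
--         for i in range(len(figurinhas_do_joao)):
--             for j in range(len(figurinhas_da_maria)):
--                 if figurinhas_do_joao[i] == figurinhas_da_maria[j]:
--                     cont += 1
--         qtd = len(figurinhas_do_joao) - cont
--
--
--     else:
--         for i in range(len(figurinhas_da_maria)):
--             for j in range(len(figurinhas_do_joao)):
--                 if figurinhas_da_maria[i] == figurinhas_do_joao[j]:
--                     cont += 1
--         qtd = len(figurinhas_da_maria) - cont
--     return qtd
-- ===== SOURCE B (Python) =====
-- def maximizar_troca_de_figurinhas(figurinhas_da_maria, figurinhas_do_joao):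
--     sm = sorted(figurinhas_da_maria)
--     sj = sorted(figurinhas_do_joao)
--     cont = 0
--     i = 0
--     j = 0
--     while i < len(sm) and j < len(sj):
--         if sm[i] < sj[j]:
--             i += 1
--         elif sj[j] < sm[i]:
--             j += 1
--         else:
--             v = sm[i]
--             i2 = i
--             while i2 < len(sm) and sm[i2] == v:
--                 i2 += 1
--             j2 = j
--             while j2 < len(sj) and sj[j2] == v:
--                 j2 += 1
--             cont += (i2 - i) * (j2 - j)
--             i = i2
--             j = j2
--     return min(len(sm), len(sj)) - cont
-- ===== Notes on version B (the rewrite author's own statement) =====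
-- stated objective: faster
-- what changed: Replaces the three-branch quadratic nested index scan with sorting copies of both lists and a single two-pointer merge that multiplies equal-run lengths, subtracting from the shorter length via min().
import Mathlib
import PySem

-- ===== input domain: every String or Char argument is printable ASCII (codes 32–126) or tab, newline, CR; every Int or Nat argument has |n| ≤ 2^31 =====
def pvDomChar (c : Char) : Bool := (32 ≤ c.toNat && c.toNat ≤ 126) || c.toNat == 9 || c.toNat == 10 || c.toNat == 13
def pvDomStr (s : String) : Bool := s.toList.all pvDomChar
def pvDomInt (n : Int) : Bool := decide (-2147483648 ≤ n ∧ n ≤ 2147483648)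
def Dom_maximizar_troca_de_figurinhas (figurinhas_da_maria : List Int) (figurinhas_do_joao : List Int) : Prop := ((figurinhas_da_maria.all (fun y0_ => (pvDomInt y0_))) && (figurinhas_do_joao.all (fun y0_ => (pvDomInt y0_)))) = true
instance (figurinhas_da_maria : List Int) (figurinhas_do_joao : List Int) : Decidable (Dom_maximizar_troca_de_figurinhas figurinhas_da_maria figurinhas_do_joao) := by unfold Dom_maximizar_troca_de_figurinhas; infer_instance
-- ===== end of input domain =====

-- B replaces A's three-branch quadratic nested index scan with sort-both-lists and a
-- single two-pointer merge over the sorted copies (run-length × run-length per value);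
-- A's arguments are never mutated (B sorts copies).

-- ===== PORT A =====
def maximizar_troca_de_figurinhas (figurinhas_da_maria : List Int) (figurinhas_do_joao : List Int) : Int :=
  if figurinhas_da_maria.length < figurinhas_do_joao.length then
    let cont : Int :=
      (PySem.List.pyRange 0 (figurinhas_da_maria.length : Int) 1).foldl (fun c i =>
        (PySem.List.pyRange 0 (figurinhas_do_joao.length : Int) 1).foldl (fun c j =>
          if PySem.List.pyGetD figurinhas_da_maria i 0 == PySem.List.pyGetD figurinhas_do_joao j 0
          then c + 1 else c) c) 0
    (figurinhas_da_maria.length : Int) - cont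
  else if figurinhas_do_joao.length < figurinhas_da_maria.length then
    let cont : Int :=
      (PySem.List.pyRange 0 (figurinhas_do_joao.length : Int) 1).foldl (fun c i =>
        (PySem.List.pyRange 0 (figurinhas_da_maria.length : Int) 1).foldl (fun c j =>
          if PySem.List.pyGetD figurinhas_do_joao i 0 == PySem.List.pyGetD figurinhas_da_maria j 0
          then c + 1 else c) c) 0
    (figurinhas_do_joao.length : Int) - cont
  else
    let cont : Int :=
      (PySem.List.pyRange 0 (figurinhas_da_maria.length : Int) 1).foldl (fun c i =>
        (PySem.List.pyRange 0 (figurinhas_do_joao.length : Int) 1).foldl (fun c j =>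
          if PySem.List.pyGetD figurinhas_da_maria i 0 == PySem.List.pyGetD figurinhas_do_joao j 0
          then c + 1 else c) c) 0
    (figurinhas_da_maria.length : Int) - cont

-- ===== PORT B =====
-- Source B's inner `while sm[i2] == v` run-measuring loop: returns (run length, rest of the suffix).
def pvRun (v : Int) : List Int → Nat × List Int
  | [] => (0, [])
  | a :: as =>
    if a == v then
      let r := pvRun v as
      (r.1 + 1, r.2)
    else (0, a :: as)

lemma pvRun_len_le (v : Int) (l : List Int) : (pvRun v l).2.length ≤ l.length := by
  induction l with
  | nil => simp [pvRun]
  | cons a as ih =>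
      simp only [pvRun]
      split_ifs with h
      · exact Nat.le_succ_of_le ih
      · simp

-- Source B's outer two-pointer while loop; advancing an index = dropping the head of that suffix.
def pvMerge : List Int → List Int → Int
  | [], _ => 0
  | _ :: _, [] => 0
  | a :: as, b :: bs =>
    if a < b then pvMerge as (b :: bs)
    else if b < a then pvMerge (a :: as) bs
    else
      -- run of a starting at i (includes sm[i]) times run of a starting at j (includes sj[j])
      ((pvRun a as).1 + 1 : Int) * ((pvRun a bs).1 + 1 : Int) + pvMerge (pvRun a as).2 (pvRun a bs).2
termination_by m j => m.length + j.length
decreasing_by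
  · simp
  · simp
  · have h1 := pvRun_len_le a as
    have h2 := pvRun_len_le a bs
    simp only [List.length_cons]
    omega

def maximizar_troca_de_figurinhas_alt (figurinhas_da_maria : List Int) (figurinhas_do_joao : List Int) : Int :=
  let sm := PySem.List.sorted figurinhas_da_maria (fun x => x) false
  let sj := PySem.List.sorted figurinhas_do_joao (fun x => x) false
  min (sm.length : Int) (sj.length : Int) - pvMerge sm sj

-- ===== PRECONDITION & SPEC =====
def Spec_maximizar_troca_de_figurinhas (figurinhas_da_maria : List Int) (figurinhas_do_joao : List Int) (out : Int) : Prop := out = maximizar_troca_de_figurinhas_alt figurinhas_da_maria figurinhas_do_joao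
instance (figurinhas_da_maria : List Int) (figurinhas_do_joao : List Int) (out : Int) : Decidable (Spec_maximizar_troca_de_figurinhas figurinhas_da_maria figurinhas_do_joao out) := by unfold Spec_maximizar_troca_de_figurinhas; infer_instance

-- ===== CLAIM (what is proved, stated in full; the proofs are below) =====
def Claim_equal_maximizar_troca_de_figurinhas : Prop := ∀ (figurinhas_da_maria : List Int) (figurinhas_do_joao : List Int), Dom_maximizar_troca_de_figurinhas figurinhas_da_maria figurinhas_do_joao → Spec_maximizar_troca_de_figurinhas figurinhas_da_maria figurinhas_do_joao (maximizar_troca_de_figurinhas figurinhas_da_maria figurinhas_do_joao)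

-- ===== LEMMAS AND PROOFS =====

-- A's inner loop over indices of `l` counts the occurrences of `v` in `l`.
lemma pv_inner_count (l : List Int) (v : Int) (c : Int) :
    (PySem.List.pyRange 0 (l.length : Int) 1).foldl
      (fun c j => if v == PySem.List.pyGetD l j 0 then c + 1 else c) c
    = c + (l.count v : Int) := by
  rw [PySem.List.foldl_pyRange_zero_pyGetD' l 0 (fun acc y => if v == y then acc + 1 else acc) c]
  have h : (fun (acc y : Int) => if v == y then acc + 1 else acc)
      = (fun (acc y : Int) => if y == v then acc + 1 else acc) := by
    funext acc y; simp [BEq.comm]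
  rw [h, PySem.List.foldl_beq_add_one]

-- A's nested double loop sums the per-element counts.
lemma pv_double_count (m l : List Int) :
    (PySem.List.pyRange 0 (m.length : Int) 1).foldl (fun c i =>
      (PySem.List.pyRange 0 (l.length : Int) 1).foldl (fun c j =>
        if PySem.List.pyGetD m i 0 == PySem.List.pyGetD l j 0 then c + 1 else c) c) 0
    = (m.map (fun x => (l.count x : Int))).sum := by
  rw [PySem.List.foldl_pyRange_zero_pyGetD' m 0
        (fun acc y => (PySem.List.pyRange 0 (l.length : Int) 1).foldl
          (fun c j => if y == PySem.List.pyGetD l j 0 then c + 1 else c) acc) 0]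
  have h : (fun (acc y : Int) => (PySem.List.pyRange 0 (l.length : Int) 1).foldl
          (fun c j => if y == PySem.List.pyGetD l j 0 then c + 1 else c) acc)
      = (fun (acc y : Int) => acc + (l.count y : Int)) := by
    funext acc y; exact pv_inner_count l y acc
  rw [h, PySem.List.foldl_add]
  simp

-- the paired-count sum is symmetric in the two lists
lemma pv_sum_count_comm (m l : List Int) :
    (m.map (fun x => (l.count x : Int))).sum = (l.map (fun y => (m.count y : Int))).sum := by
  induction m with
  | nil => simp
  | cons a t ih =>
      simp only [List.map_cons, List.sum_cons, ih]
      have : ∀ y : Int, ((a :: t).count y : Int) = (if y == a then 1 else 0) + (t.count y : Int) := by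
        intro y
        rcases eq_or_ne y a with h | h
        · subst h; simp; omega
        · simp [h, Ne.symm h]
      simp only [this]
      rw [PySem.List.sum_map_add_int (f := fun y => if y == a then (1:Int) else 0)
            (g := fun y => (t.count y : Int))]
      have hc : (l.map (fun y => if y == a then (1:Int) else 0)).sum = (l.count a : Int) := by
        rw [PySem.List.sum_map_ite_one_zero]
        simp [List.count]
      rw [hc]

-- A's value, in closed form.
lemma pv_A_eq (m l : List Int) :
    maximizar_troca_de_figurinhas m l
      = min (m.length : Int) (l.length : Int) - (m.map (fun x => (l.count x : Int))).sum := by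
  simp only [maximizar_troca_de_figurinhas]
  rcases lt_trichotomy m.length l.length with h | h | h
  · rw [if_pos h, pv_double_count]
    have : min (m.length : Int) (l.length : Int) = (m.length : Int) := by
      apply min_eq_left; exact_mod_cast Nat.le_of_lt h
    rw [this]
  · rw [if_neg (by omega), if_neg (by omega), pv_double_count]
    have : min (m.length : Int) (l.length : Int) = (m.length : Int) := by
      apply min_eq_left; exact_mod_cast Nat.le_of_eq h
    rw [this]
  · rw [if_neg (by omega), if_pos h, pv_double_count, pv_sum_count_comm]
    have : min (m.length : Int) (l.length : Int) = (l.length : Int) := by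
      apply min_eq_right; exact_mod_cast Nat.le_of_lt h
    rw [this]

-- pvRun splits any list into a prefix of copies of v and the rest (unconditionally),
-- so a sum over the list decomposes accordingly.
lemma pvRun_split_sum (v : Int) (l : List Int) (f : Int → Int) :
    (l.map f).sum = ((pvRun v l).1 : Int) * f v + ((pvRun v l).2.map f).sum := by
  induction l with
  | nil => simp [pvRun]
  | cons a as ih =>
      simp only [pvRun]
      split_ifs with h
      · have ha : a = v := by simpa using h
        simp only [List.map_cons, List.sum_cons, ih, ha]
        push_cast
        ring
      · simp

-- On a sorted list whose elements are all ≥ v, pvRun v counts exactly the occurrences of v …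
lemma pvRun_fst_count (v : Int) (l : List Int)
    (hs : l.Pairwise (· ≤ ·)) (hge : ∀ x ∈ l, v ≤ x) :
    ((pvRun v l).1 : Int) = (l.count v : Int) := by
  induction l with
  | nil => simp [pvRun]
  | cons a as ih =>
      rcases List.pairwise_cons.mp hs with ⟨hall, htl⟩
      simp only [pvRun]
      split_ifs with h
      · have ha : a = v := by simpa using h
        have : ((pvRun v as).1 : Int) = (as.count v : Int) :=
          ih htl (fun x hx => hge x (List.mem_cons_of_mem a hx))
        simp [ha, this]
      · have hav : a ≠ v := by simpa using h
        have hva : v < a := lt_of_le_of_ne (hge a (List.mem_cons_self)) (Ne.symm hav)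
        have hnot : v ∉ a :: as := by
          intro hv
          rcases List.mem_cons.mp hv with rfl | hv
          · exact absurd rfl hav.symm
          · exact absurd (hall v hv) (not_le.mpr hva)
        simp [List.count_eq_zero.mpr hnot]

-- … and its remainder is sorted with every element strictly above v.
lemma pvRun_snd_sorted (v : Int) (l : List Int) (hs : l.Pairwise (· ≤ ·)) :
    (pvRun v l).2.Pairwise (· ≤ ·) := by
  induction l with
  | nil => simp [pvRun]
  | cons a as ih =>
      rcases List.pairwise_cons.mp hs with ⟨_, htl⟩
      simp only [pvRun]
      split_ifs with h
      · exact ih htl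
      · exact hs

lemma pvRun_snd_gt (v : Int) (l : List Int)
    (hs : l.Pairwise (· ≤ ·)) (hge : ∀ x ∈ l, v ≤ x) :
    ∀ x ∈ (pvRun v l).2, v < x := by
  induction l with
  | nil => simp [pvRun]
  | cons a as ih =>
      rcases List.pairwise_cons.mp hs with ⟨hall, htl⟩
      simp only [pvRun]
      split_ifs with h
      · exact ih htl (fun x hx => hge x (List.mem_cons_of_mem a hx))
      · have hav : a ≠ v := by simpa using h
        have hva : v < a := lt_of_le_of_ne (hge a (List.mem_cons_self)) (Ne.symm hav)
        intro x hx
        rcases List.mem_cons.mp hx with rfl | hx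
        · exact hva
        · exact lt_of_lt_of_le hva (hall x hx)

-- the remainder's counts agree with the original's away from v
lemma pvRun_snd_count (v : Int) (l : List Int) (x : Int) (hx : x ≠ v) :
    (pvRun v l).2.count x = l.count x := by
  induction l with
  | nil => simp [pvRun]
  | cons a as ih =>
      simp only [pvRun]
      split_ifs with h
      · have ha : a = v := by simpa using h
        rw [ih, ha, List.count_cons]
        simp [Ne.symm, hx]
      · rfl

-- the merge of the two sorted copies computes the paired-count sum
lemma pvMerge_eq : ∀ (n : Nat) (m j : List Int), m.length + j.length ≤ n →
    m.Pairwise (· ≤ ·) → j.Pairwise (· ≤ ·) →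
    pvMerge m j = (m.map (fun x => (j.count x : Int))).sum := by
  intro n
  induction n with
  | zero =>
      intro m j hlen _ _
      have hm : m = [] := List.eq_nil_of_length_eq_zero (by omega)
      subst hm; simp [pvMerge]
  | succ n ih =>
      intro m j hlen hm hj
      match m, j with
      | [], _ => simp [pvMerge]
      | a :: as, [] => simp [pvMerge]
      | a :: as, b :: bs =>
        rcases List.pairwise_cons.mp hm with ⟨hma, hmt⟩
        rcases List.pairwise_cons.mp hj with ⟨hjb, hjt⟩
        simp only [pvMerge]
        split_ifs with h1 h2
        · -- a < b : a occurs 0 times in b :: bs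
          have hnot : a ∉ b :: bs := by
            intro hmem
            rcases List.mem_cons.mp hmem with rfl | hmem
            · exact absurd h1 (lt_irrefl a)
            · exact absurd (lt_of_lt_of_le h1 (hjb a hmem)) (lt_irrefl a)
          rw [ih as (b :: bs) (by simp at hlen ⊢; omega) hmt hj]
          simp [List.count_eq_zero.mpr hnot]
        · -- b < a : b matches nothing in a :: as
          rw [ih (a :: as) bs (by simp at hlen ⊢; omega) hm hjt]
          have hcong : ∀ x ∈ a :: as, ((b :: bs).count x : Int) = (bs.count x : Int) := by
            intro x hx
            have hxb : x ≠ b := by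
              have hax : a ≤ x := by
                rcases List.mem_cons.mp hx with rfl | hx
                · exact le_refl x
                · exact hma x hx
              exact fun hxb => absurd (hxb ▸ hax) (not_le.mpr h2)
            rw [List.count_cons]
            simp [Ne.symm hxb]
          rw [List.map_congr_left hcong]
        · -- a = b : multiply the two run lengths and recurse past them
          have hab : a = b := le_antisymm (not_lt.mp h2) (not_lt.mp h1)
          subst hab
          have hgeas : ∀ x ∈ as, a ≤ x := hma
          have hgebs : ∀ x ∈ bs, a ≤ x := hjb
          have hrec := ih (pvRun a as).2 (pvRun a bs).2
            (by have := pvRun_len_le a as; have := pvRun_len_le a bs; simp at hlen; omega)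
            (pvRun_snd_sorted a as hmt) (pvRun_snd_sorted a bs hjt)
          rw [hrec]
          -- decompose the RHS sum
          have hsplit := pvRun_split_sum a as (fun x => ((a :: bs).count x : Int))
          have hcount_a : ((a :: bs).count a : Int) = ((pvRun a bs).1 : Int) + 1 := by
            rw [List.count_cons]
            simp [pvRun_fst_count a bs hjt hgebs]
          have hcong : ∀ x ∈ (pvRun a as).2, ((a :: bs).count x : Int) = ((pvRun a bs).2.count x : Int) := by
            intro x hx
            have hxa : a < x := pvRun_snd_gt a as hmt hgeas x hx
            have hxna : x ≠ a := ne_of_gt hxa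
            rw [List.count_cons, pvRun_snd_count a bs x hxna]
            simp [Ne.symm hxna]
          calc ((pvRun a as).1 + 1 : Int) * ((pvRun a bs).1 + 1 : Int)
              + ((pvRun a as).2.map (fun x => ((pvRun a bs).2.count x : Int))).sum
              = ((a :: bs).count a : Int)
                + (((pvRun a as).1 : Int) * ((a :: bs).count a : Int)
                  + ((pvRun a as).2.map (fun x => ((a :: bs).count x : Int))).sum) := by
                rw [List.map_congr_left hcong, hcount_a]; ring
            _ = ((a :: bs).count a : Int) + (as.map (fun x => ((a :: bs).count x : Int))).sum := by
                rw [← hsplit]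
            _ = ((a :: as).map (fun x => ((a :: bs).count x : Int))).sum := by
                simp

-- sums of paired counts are permutation-invariant on both sides
lemma pv_sum_perm (m m' j j' : List Int) (hm : m.Perm m') (hj : j.Perm j') :
    (m.map (fun x => (j.count x : Int))).sum = (m'.map (fun x => (j'.count x : Int))).sum := by
  have hfun : (fun x : Int => (j.count x : Int)) = (fun x : Int => (j'.count x : Int)) := by
    funext x; rw [hj.count_eq]
  rw [hfun]
  exact (hm.map _).sum_eq

-- B's value, in the same closed form.
lemma pv_B_eq (m l : List Int) :
    maximizar_troca_de_figurinhas_alt m l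
      = min (m.length : Int) (l.length : Int) - (m.map (fun x => (l.count x : Int))).sum := by
  simp only [maximizar_troca_de_figurinhas_alt]
  have hsm := PySem.List.sorted_perm (xs := m) (key := fun x : Int => x) (rev := false)
  have hsj := PySem.List.sorted_perm (xs := l) (key := fun x : Int => x) (rev := false)
  have hpm : (PySem.List.sorted m (fun x => x) false).Pairwise (· ≤ ·) := by
    have := PySem.List.sorted_pairwise (xs := m) (key := fun x : Int => x)
    simpa using this
  have hpj : (PySem.List.sorted l (fun x => x) false).Pairwise (· ≤ ·) := by
    have := PySem.List.sorted_pairwise (xs := l) (key := fun x : Int => x)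
    simpa using this
  rw [pvMerge_eq ((PySem.List.sorted m (fun x => x) false).length
        + (PySem.List.sorted l (fun x => x) false).length) _ _ (le_refl _) hpm hpj]
  rw [pv_sum_perm _ m _ l hsm hsj, hsm.length_eq, hsj.length_eq]

-- ===== VERDICT (by name: the statement is the Claim_ definition above) =====
theorem maximizar_troca_de_figurinhas_spec : Claim_equal_maximizar_troca_de_figurinhas := by
  intro m l _
  unfold Spec_maximizar_troca_de_figurinhas
  rw [pv_A_eq, pv_B_eq]
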